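-- pv_equiv track=rewrite | github.com/lanlou1554/3DMeetingRoomGeneration | judgeUtil.py | obtainAndEntities
-- ===== SOURCE A (Python) =====
-- def obtainAndEntities(conjAnd, entities):
--     andEntites = {}
--     for first, second in conjAnd:
--         if first not in entities.keys() or second not in entities.keys():
--             continue
--         if first in andEntites.keys():
--             andEntites[first].add(second)
--         else:
--             andEntites[first] = {second}
--         if second in andEntites.keys():
--             andEntites[second].add(first)
--         else:
--             andEntites[second] = {first}
--     return andEntites
-- ===== SOURCE B (Python) =====
-- def obtainAndEntities(conjAnd, entities):
--     # Two-phase gather-per-node algorithm: first discover the node order,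
--     # then compute each node's neighbor set by its own scan over the pairs.
--     good = [(a, b) for a, b in conjAnd if a in entities and b in entities]
--     nodes = []
--     for a, b in good:
--         if a not in nodes:
--             nodes.append(a)
--         if b not in nodes:
--             nodes.append(b)
--
--     def neighbors(u):
--         s = set()
--         for a, b in good:
--             if a == u:
--                 s.add(b)
--             if b == u:
--                 s.add(a)
--         return s
--
--     return {u: neighbors(u) for u in nodes}
-- ===== Notes on version B (the rewrite author's own statement) =====
-- stated objective: alternative
-- what changed: Replaces A's single-pass incremental dict-of-sets construction (branching on key presence per pair) with a two-phase gather-per-node algorithm: filter the pairs once, discover the node list in first-appearance order, then compute each node's neighbor set by its own independent scan over the filtered pairs.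
import Mathlib
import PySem

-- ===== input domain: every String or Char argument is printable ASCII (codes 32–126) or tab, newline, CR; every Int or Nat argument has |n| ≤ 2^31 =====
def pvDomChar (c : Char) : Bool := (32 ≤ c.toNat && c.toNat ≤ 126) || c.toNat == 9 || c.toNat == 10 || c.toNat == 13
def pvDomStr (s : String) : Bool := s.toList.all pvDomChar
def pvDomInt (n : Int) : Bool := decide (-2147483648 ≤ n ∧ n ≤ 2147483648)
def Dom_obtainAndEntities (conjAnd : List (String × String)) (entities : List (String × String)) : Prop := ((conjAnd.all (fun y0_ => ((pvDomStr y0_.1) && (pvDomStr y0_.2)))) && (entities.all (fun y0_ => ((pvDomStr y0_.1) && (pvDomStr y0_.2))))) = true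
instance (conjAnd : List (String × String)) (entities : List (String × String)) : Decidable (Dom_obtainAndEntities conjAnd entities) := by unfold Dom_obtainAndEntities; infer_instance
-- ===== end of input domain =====

-- B replaces A's single-pass incremental dict-of-sets build by a two-phase gather-per-node
-- algorithm: discover the node order once, then compute each node's neighbor set by its own
-- scan over the valid pairs (alternative decomposition; B rescans per node, so it is not faster).

-- ===== PORT A =====
def obtainAndEntities (conjAnd : List (String × String)) (entities : List (String × String)) : List (String × List String) :=
  (conjAnd.foldl (fun (andEntites : PySem.Dict String (PySem.Set String)) fs =>
      if !(PySem.Dict.contains ⟨entities⟩ fs.1) || !(PySem.Dict.contains ⟨entities⟩ fs.2) then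
        andEntites
      else
        let and1 :=
          if andEntites.contains fs.1 then
            PySem.Dict.modify andEntites fs.1 PySem.Set.empty (fun s => PySem.Set.add s fs.2)
          else
            PySem.Dict.insert andEntites fs.1 (PySem.Set.ofList [fs.2])
        if and1.contains fs.2 then
          PySem.Dict.modify and1 fs.2 PySem.Set.empty (fun s => PySem.Set.add s fs.1)
        else
          PySem.Dict.insert and1 fs.2 (PySem.Set.ofList [fs.1]))
    PySem.Dict.empty).items

-- ===== PORT B =====
-- Helpers mirror Source B: the filtered pair list, the node-discovery loop, and the per-node
-- neighbor scan; the final dict comprehension over the (duplicate-free) node list is its items list.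
def pvGood (conjAnd : List (String × String)) (entities : List (String × String)) : List (String × String) :=
  conjAnd.filter (fun p => PySem.Dict.contains (⟨entities⟩ : PySem.Dict String String) p.1
                        && PySem.Dict.contains (⟨entities⟩ : PySem.Dict String String) p.2)

def pvNodes (good : List (String × String)) : List String :=
  good.foldl (fun (ns : List String) p =>
      let ns1 := if ns.contains p.1 then ns else ns ++ [p.1]
      if ns1.contains p.2 then ns1 else ns1 ++ [p.2]) []

def pvNeighbors (good : List (String × String)) (u : String) : PySem.Set String :=
  good.foldl (fun (s : PySem.Set String) p =>
      let s1 := if p.1 == u then PySem.Set.add s p.2 else s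
      if p.2 == u then PySem.Set.add s1 p.1 else s1) PySem.Set.empty

def obtainAndEntities_alt (conjAnd : List (String × String)) (entities : List (String × String)) : List (String × List String) :=
  let good := pvGood conjAnd entities
  (pvNodes good).map (fun u => (u, pvNeighbors good u))

-- ===== PRECONDITION & SPEC =====
def Spec_obtainAndEntities (conjAnd : List (String × String)) (entities : List (String × String)) (out : List (String × List String)) : Prop := out = obtainAndEntities_alt conjAnd entities
instance (conjAnd : List (String × String)) (entities : List (String × String)) (out : List (String × List String)) : Decidable (Spec_obtainAndEntities conjAnd entities out) := by unfold Spec_obtainAndEntities; infer_instance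

-- ===== CLAIM (what is proved, stated in full; the proofs are below) =====
def Claim_equal_obtainAndEntities : Prop := ∀ (conjAnd : List (String × String)) (entities : List (String × String)), Dom_obtainAndEntities conjAnd entities → Spec_obtainAndEntities conjAnd entities (obtainAndEntities conjAnd entities)

-- ===== LEMMAS AND PROOFS =====

-- The directed-edge step A performs twice per accepted pair
def pvM (adj : PySem.Dict String (PySem.Set String)) (e : String × String) : PySem.Dict String (PySem.Set String) :=
  PySem.Dict.modify adj e.1 PySem.Set.empty (fun s => PySem.Set.add s e.2)

-- A's branch-on-presence insertion of one directed edge is the setdefault-style modify step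
lemma pv_step_eq (d : PySem.Dict String (PySem.Set String)) (u v : String) :
    (if d.contains u then
        PySem.Dict.modify d u PySem.Set.empty (fun s => PySem.Set.add s v)
      else PySem.Dict.insert d u (PySem.Set.ofList [v]))
      = pvM d (u, v) := by
  unfold pvM
  by_cases h : d.contains u
  · simp [h]
  · simp only [h]
    have hn : d.items.find? (fun p => p.1 == u) = none := by
      rw [List.find?_eq_none]
      intro p hp hk
      apply h
      simp only [PySem.Dict.contains, List.any_eq_true]
      exact ⟨p, hp, hk⟩
    simp [PySem.Dict.modify, PySem.Dict.getD, PySem.Dict.get?, hn, PySem.Set.ofList,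
          PySem.Set.add, PySem.Set.empty, PySem.Set.contains]

-- A's guarded fold over the raw pairs is the fold of pvM over both directed edges of each valid pair
lemma pv_Afold (conjAnd : List (String × String)) (entities : List (String × String))
    (d : PySem.Dict String (PySem.Set String)) :
    conjAnd.foldl (fun (andEntites : PySem.Dict String (PySem.Set String)) fs =>
      if !(PySem.Dict.contains ⟨entities⟩ fs.1) || !(PySem.Dict.contains ⟨entities⟩ fs.2) then
        andEntites
      else
        let and1 :=
          if andEntites.contains fs.1 then
            PySem.Dict.modify andEntites fs.1 PySem.Set.empty (fun s => PySem.Set.add s fs.2)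
          else
            PySem.Dict.insert andEntites fs.1 (PySem.Set.ofList [fs.2])
        if and1.contains fs.2 then
          PySem.Dict.modify and1 fs.2 PySem.Set.empty (fun s => PySem.Set.add s fs.1)
        else
          PySem.Dict.insert and1 fs.2 (PySem.Set.ofList [fs.1])) d
    = (pvGood conjAnd entities).foldl (fun adj p => pvM (pvM adj (p.1, p.2)) (p.2, p.1)) d := by
  induction conjAnd generalizing d with
  | nil => rfl
  | cons p rest ih =>
    rcases p with ⟨a, b⟩
    unfold pvGood
    by_cases hv : (PySem.Dict.contains (⟨entities⟩ : PySem.Dict String String) a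
                && PySem.Dict.contains (⟨entities⟩ : PySem.Dict String String) b) = true
    · have h0 : (!(PySem.Dict.contains (⟨entities⟩ : PySem.Dict String String) a)
          || !(PySem.Dict.contains (⟨entities⟩ : PySem.Dict String String) b)) = false := by
        simp at hv ⊢; exact hv
      simp only [List.foldl_cons, List.filter_cons, hv, if_true, h0, Bool.false_eq_true, if_false]
      rw [pv_step_eq, pv_step_eq]
      exact ih _
    · have h1 : (!(PySem.Dict.contains (⟨entities⟩ : PySem.Dict String String) a)
          || !(PySem.Dict.contains (⟨entities⟩ : PySem.Dict String String) b)) = true := by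
        cases hA : PySem.Dict.contains (⟨entities⟩ : PySem.Dict String String) a <;>
          cases hB : PySem.Dict.contains (⟨entities⟩ : PySem.Dict String String) b <;>
          simp_all
      simp only [List.foldl_cons, List.filter_cons, hv, Bool.false_eq_true, if_false, h1, if_true]
      exact ih _

-- keys of A's dict evolve exactly like B's node-discovery loop
lemma pv_keys (good : List (String × String)) (d : PySem.Dict String (PySem.Set String)) :
    (good.foldl (fun adj p => pvM (pvM adj (p.1, p.2)) (p.2, p.1)) d).keys
      = good.foldl (fun (ns : List String) p =>
          let ns1 := if ns.contains p.1 then ns else ns ++ [p.1]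
          if ns1.contains p.2 then ns1 else ns1 ++ [p.2]) d.keys := by
  induction good generalizing d with
  | nil => rfl
  | cons p rest ih =>
    simp only [List.foldl_cons]
    rw [ih]
    congr 1
    have hk : ∀ (d' : PySem.Dict String (PySem.Set String)) (u v : String),
        (pvM d' (u, v)).keys = if d'.keys.contains u then d'.keys else d'.keys ++ [u] := by
      intro d' u v
      unfold pvM
      rw [PySem.Dict.keys_modify]
      by_cases h : d'.contains u = true
      · rw [PySem.Dict.keys_insert_of_contains d' _ h]
        have hm : u ∈ d'.keys := (PySem.Dict.contains_iff_mem_keys d' u).mp h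
        simp [hm]
      · rw [PySem.Dict.keys_insert_of_not_contains d' _ (by simpa using h)]
        have hm : ¬ u ∈ d'.keys := fun hm => h ((PySem.Dict.contains_iff_mem_keys d' u).mpr hm)
        simp [hm]
    rw [hk, hk]

-- node lists produced by the discovery loop stay duplicate-free
lemma pv_nodes_nodup (good : List (String × String)) (ks : List String) (h : ks.Nodup) :
    (good.foldl (fun (ns : List String) p =>
        let ns1 := if ns.contains p.1 then ns else ns ++ [p.1]
        if ns1.contains p.2 then ns1 else ns1 ++ [p.2]) ks).Nodup := by
  induction good generalizing ks with
  | nil => exact h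
  | cons p rest ih =>
    simp only [List.foldl_cons]
    apply ih
    have hstep : ∀ (l : List String) (x : String), l.Nodup →
        (if l.contains x then l else l ++ [x]).Nodup := by
      intro l x hl
      by_cases hc : x ∈ l
      · simp [hc, hl]
      · have hcc : l.contains x = false := by simpa using hc
        simp only [hcc, Bool.false_eq_true, if_false]
        rw [List.nodup_append]
        refine ⟨hl, List.nodup_singleton x, ?_⟩
        intro a ha b hb
        simp only [List.mem_singleton] at hb
        subst hb
        exact fun h => hc (h ▸ ha)
    exact hstep _ _ (hstep _ _ h)

-- the value A keeps at key u evolves exactly like B's per-node neighbor scan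
lemma pv_getD (good : List (String × String)) (d : PySem.Dict String (PySem.Set String)) (u : String) :
    (good.foldl (fun adj p => pvM (pvM adj (p.1, p.2)) (p.2, p.1)) d).getD u PySem.Set.empty
      = good.foldl (fun (s : PySem.Set String) p =>
          let s1 := if p.1 == u then PySem.Set.add s p.2 else s
          if p.2 == u then PySem.Set.add s1 p.1 else s1) (d.getD u PySem.Set.empty) := by
  induction good generalizing d with
  | nil => rfl
  | cons p rest ih =>
    simp only [List.foldl_cons]
    rw [ih]
    congr 1
    unfold pvM
    rcases p with ⟨a, b⟩
    simp only [PySem.Dict.getD_modify, beq_iff_eq]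
    by_cases h1 : u = a <;> by_cases h2 : u = b
    · cases h1; cases h2; simp
    · cases h1; simp [h2, Ne.symm h2]
    · cases h2; simp [h1, Ne.symm h1]
    · simp [h1, h2, Ne.symm h1, Ne.symm h2]

-- a dict with duplicate-free keys is the map of getD over its keys
lemma pv_items_eq_map (d : PySem.Dict String (PySem.Set String)) (h : d.keys.Nodup) :
    d.items = d.keys.map (fun k => (k, d.getD k PySem.Set.empty)) := by
  have hkeys : d.keys = d.items.map Prod.fst := rfl
  rw [hkeys, List.map_map]
  conv_lhs => rw [← List.map_id d.items]
  apply List.map_congr_left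
  intro p hp
  rcases p with ⟨k, v⟩
  simp only [id, Function.comp]
  rw [PySem.Dict.getD_of_mem_items d hp h]

-- ===== VERDICT (by name: the statement is the Claim_ definition above) =====
theorem obtainAndEntities_spec : Claim_equal_obtainAndEntities := by
  intro conjAnd entities _
  unfold Spec_obtainAndEntities obtainAndEntities obtainAndEntities_alt
  rw [pv_Afold]
  set D := (pvGood conjAnd entities).foldl (fun adj p => pvM (pvM adj (p.1, p.2)) (p.2, p.1))
    PySem.Dict.empty with hD
  have hkeys : D.keys = pvNodes (pvGood conjAnd entities) := by
    rw [hD, pv_keys]; rfl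
  have hnodup : D.keys.Nodup := by
    rw [hkeys]; exact pv_nodes_nodup _ _ List.nodup_nil
  rw [pv_items_eq_map D hnodup, hkeys]
  apply List.map_congr_left
  intro u _
  have := pv_getD (pvGood conjAnd entities) PySem.Dict.empty u
  rw [← hD] at this
  simp only [this]
  rfl
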